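-- pv_equiv track=rewrite | github.com/LanLab/STECFinder | stecfinder/STECfinder.py | top_ranked_oantigen
-- ===== SOURCE A (Python) =====
-- def delete_genes(remove, genes):
--     for g in remove:
--         del genes[g]
--     return genes
--
-- def top_ranked_oantigen(genes_set):
--     genetypes = ["wzx","wzy","wzt","wzm"]
--     tophits = {x:["",0] for x in genetypes}
--     for gene in genes_set:
--         if gene.startswith("wz"):
--             genetype = gene[:3]
--             genescore = genes_set[gene]['score']
--             if genescore > tophits[genetype][1]:
--                 tophits[genetype] = [gene,genescore]
--     remove = []
--     for gene in genes_set: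
--         if gene.startswith("wz"):
--             genetype = gene[:3]
--             if gene != tophits[genetype][0]:
--                 remove.append(gene)
--     genes = delete_genes(remove, genes_set)
--     return genes
-- ===== SOURCE B (Python) =====
-- def top_ranked_oantigen(genes_set):
--     # Bucket wz* genes per antigen type, pick each bucket's first max-scoring gene,
--     # keep it only when its score beats the 0 baseline, then delete the rest in one sweep.
--     buckets = {"wzx": [], "wzy": [], "wzt": [], "wzm": []}
--     for gene in genes_set:
--         if gene.startswith("wz"):
--             buckets[gene[:3]].append(gene)
--     keep = set()
--     for members in buckets.values():
--         if members:
--             keeper = max(members, key=lambda g: genes_set[g]['score'])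
--             if genes_set[keeper]['score'] > 0:
--                 keep.add(keeper)
--     for gene in [g for g in genes_set if g.startswith("wz") and g not in keep]:
--         del genes_set[gene]
--     return genes_set
-- ===== Notes on version B (the rewrite author's own statement) =====
-- stated objective: alternative
-- what changed: Replaces A's two passes over the whole dict (a running-best tophits table per type, then a rescan comparing every wz* gene against it) by bucketing the wz*-prefixed gene names per antigen type once, picking each bucket's first maximum with max(key=score), keeping it only when its score beats the 0 baseline, and deleting the rest in one sweep.
import Mathlib
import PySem

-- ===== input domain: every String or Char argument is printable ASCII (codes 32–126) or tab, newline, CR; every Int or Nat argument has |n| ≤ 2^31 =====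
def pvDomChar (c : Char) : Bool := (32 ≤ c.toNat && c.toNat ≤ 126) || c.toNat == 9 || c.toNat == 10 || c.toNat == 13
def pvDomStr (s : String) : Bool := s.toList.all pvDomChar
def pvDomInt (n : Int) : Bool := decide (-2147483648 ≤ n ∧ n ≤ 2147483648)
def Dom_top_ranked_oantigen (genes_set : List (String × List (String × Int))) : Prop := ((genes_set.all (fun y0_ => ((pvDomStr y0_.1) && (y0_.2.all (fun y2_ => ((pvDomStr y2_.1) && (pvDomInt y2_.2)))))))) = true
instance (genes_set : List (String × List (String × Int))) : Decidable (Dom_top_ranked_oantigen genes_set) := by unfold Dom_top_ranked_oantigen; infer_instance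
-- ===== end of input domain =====

-- B replaces A's running-best scan over interleaved types by bucketing the wz* genes per antigen
-- type once and keeping each bucket's first maximum when it beats the 0 baseline (objective:
-- alternative decomposition, same cost). Both Pythons mutate the dict in place; the equivalence
-- proved here is about the returned dict (which is that same object).

-- shared helper: genes_set[gene]['score'] (both Pythons perform exactly this lookup;
-- a missing 'score' key is a KeyError, excluded by Pre_, so the default 0 is never used there)
def pvScoreOf (genes_set : List (String × List (String × Int))) (gene : String) : Int :=
  (PySem.Dict.get? (PySem.Dict.mk (((PySem.Dict.mk genes_set).get? gene).getD [])) "score").getD 0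

-- ===== PORT A =====
def delete_genes (remove : List String) (genes : PySem.Dict String (List (String × Int))) :
    PySem.Dict String (List (String × Int)) :=
  remove.foldl (fun genes g => genes.erase g) genes

def top_ranked_oantigen (genes_set : List (String × List (String × Int))) :
    List (String × List (String × Int)) :=
  let genetypes : List String := ["wzx", "wzy", "wzt", "wzm"]
  let tophits : PySem.Dict String (String × Int) :=
    genetypes.foldl (fun d x => d.insert x ("", 0)) (PySem.Dict.mk [])
  let tophits := genes_set.foldl (fun tophits kv =>
      if PySem.Str.startswith kv.1 "wz" then
        -- tophits[genetype] is a KeyError for a wz type not among the four (excluded by Pre_)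
        if pvScoreOf genes_set kv.1 > ((tophits.get? (PySem.Str.slice kv.1 none (some 3))).getD ("", 0)).2 then
          tophits.insert (PySem.Str.slice kv.1 none (some 3)) (kv.1, pvScoreOf genes_set kv.1)
        else tophits
      else tophits) tophits
  let remove : List String := genes_set.foldl (fun remove kv =>
      if PySem.Str.startswith kv.1 "wz" then
        if kv.1 ≠ ((tophits.get? (PySem.Str.slice kv.1 none (some 3))).getD ("", 0)).1 then
          remove ++ [kv.1]
        else remove
      else remove) []
  (delete_genes remove (PySem.Dict.mk genes_set)).items

-- ===== PORT B =====
def top_ranked_oantigen_alt (genes_set : List (String × List (String × Int))) :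
    List (String × List (String × Int)) :=
  let buckets : PySem.Dict String (List String) :=
    PySem.Dict.mk [("wzx", []), ("wzy", []), ("wzt", []), ("wzm", [])]
  let buckets := genes_set.foldl (fun buckets kv =>
      if PySem.Str.startswith kv.1 "wz" then
        -- buckets[gene[:3]].append(gene): KeyError for an unknown wz type (excluded by Pre_)
        if buckets.contains (PySem.Str.slice kv.1 none (some 3)) then
          buckets.modify (PySem.Str.slice kv.1 none (some 3)) [] (fun l => l ++ [kv.1])
        else buckets
      else buckets) buckets
  let keep : PySem.Set String := buckets.values.foldl (fun keep members =>
      if members ≠ [] then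
        match PySem.List.max? members (fun g => pvScoreOf genes_set g) with
        | some keeper => if pvScoreOf genes_set keeper > 0 then keep.add keeper else keep
        | none => keep
      else keep) PySem.Set.empty
  (((genes_set.filter (fun kv =>
        PySem.Str.startswith kv.1 "wz" && !(keep.contains kv.1))).map (·.1)).foldl
      (fun genes gene => genes.erase gene) (PySem.Dict.mk genes_set)).items

-- ===== PRECONDITION & SPEC =====
-- Pre_ excludes exactly the inputs where the Python A raises a KeyError: a key starting with
-- "wz" whose 3-char type is not one of wzx/wzy/wzt/wzm (tophits[genetype]) or whose entry has
-- no 'score' key (genes_set[gene]['score']).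
def Pre_top_ranked_oantigen (genes_set : List (String × List (String × Int))) : Prop :=
  ∀ kv ∈ genes_set, PySem.Str.startswith kv.1 "wz" = true →
    (PySem.Str.slice kv.1 none (some 3) ∈ (["wzx", "wzy", "wzt", "wzm"] : List String) ∧
     (PySem.Dict.mk (((PySem.Dict.mk genes_set).get? kv.1).getD [])).contains "score" = true)
instance (genes_set : List (String × List (String × Int))) : Decidable (Pre_top_ranked_oantigen genes_set) := by
  unfold Pre_top_ranked_oantigen; infer_instance

def pvWitness_top_ranked_oantigen : (List (String × List (String × Int))) :=
  [("wzx1", [("score", 5)]), ("wzxA", [("score", 7)]), ("wzy_1", [("score", 0)]), ("abc", [("x", 1)])]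

def Spec_top_ranked_oantigen (genes_set : List (String × List (String × Int))) (out : List (String × List (String × Int))) : Prop := out = top_ranked_oantigen_alt genes_set
instance (genes_set : List (String × List (String × Int))) (out : List (String × List (String × Int))) : Decidable (Spec_top_ranked_oantigen genes_set out) := by unfold Spec_top_ranked_oantigen; infer_instance

-- ===== CLAIM (what is proved, stated in full; the proofs are below) =====
def Claim_equal_top_ranked_oantigen : Prop := ∀ (genes_set : List (String × List (String × Int))), Dom_top_ranked_oantigen genes_set → Pre_top_ranked_oantigen genes_set → Spec_top_ranked_oantigen genes_set (top_ranked_oantigen genes_set)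

-- ===== LEMMAS AND PROOFS =====

def pvTy (k : String) : String := PySem.Str.slice k none (some 3)

def pvBucket (gs : List (String × List (String × Int))) (t : String) : List String :=
  (gs.filter (fun kv => PySem.Str.startswith kv.1 "wz" && (pvTy kv.1 == t))).map (·.1)

-- the FIRST maximal element (Python's max and the strict-> scan both pick it)
def pvFam (sc : String → Int) : List String → Option String
  | [] => none
  | g :: r =>
    match pvFam sc r with
    | none => some g
    | some m => if sc g ≥ sc m then some g else some m

def pvBest (sc : String → Int) (ms : List String) (acc : String × Int) : String × Int :=
  ms.foldl (fun b g => if sc g > b.2 then (g, sc g) else b) acc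

def pvMkB (m1 m2 m3 m4 : List String) : PySem.Dict String (List String) :=
  PySem.Dict.mk [("wzx", m1), ("wzy", m2), ("wzt", m3), ("wzm", m4)]

def pvKeepC (gs : List (String × List (String × Int))) (ms : List String) (k : String) : Bool :=
  match PySem.List.max? ms (fun g => pvScoreOf gs g) with
  | some m => k == m && decide (0 < pvScoreOf gs m)
  | none => false

theorem pvBucket_cons_of {kv : String × List (String × Int)} {t : String}
    (gs : List (String × List (String × Int)))
    (h1 : PySem.Str.startswith kv.1 "wz" = true) (h2 : pvTy kv.1 = t) :
    pvBucket (kv :: gs) t = kv.1 :: pvBucket gs t := by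
  simp only [pvBucket, List.filter_cons, h1, h2, beq_self_eq_true, Bool.and_self, if_true,
    List.map_cons]

theorem pvBucket_cons_not {kv : String × List (String × Int)} {t : String}
    (gs : List (String × List (String × Int)))
    (h : PySem.Str.startswith kv.1 "wz" = false ∨ pvTy kv.1 ≠ t) :
    pvBucket (kv :: gs) t = pvBucket gs t := by
  have hc : (PySem.Str.startswith kv.1 "wz" && (pvTy kv.1 == t)) = false := by
    rcases h with h | h
    · rw [h]; rfl
    · simp [h]
  simp only [pvBucket, List.filter_cons, hc, Bool.false_eq_true, if_false]

theorem pvFam_ne_none {sc : String → Int} {ms : List String} (h : ms ≠ []) : ∃ m, pvFam sc ms = some m := by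
  cases ms with
  | nil => exact absurd rfl h
  | cons g r =>
    simp only [pvFam]
    cases hr : pvFam sc r with
    | none => exact ⟨g, rfl⟩
    | some m' => by_cases hc : sc g ≥ sc m' <;> simp [hc]

theorem pvBest_eq (sc : String → Int) : ∀ (ms : List String) (b : String) (s : Int),
    pvBest sc ms (b, s) = (match pvFam sc ms with
      | none => (b, s)
      | some m => if sc m > s then (m, sc m) else (b, s)) := by
  intro ms
  induction ms with
  | nil => intro b s; simp [pvBest, pvFam]
  | cons g r ih =>
    intro b s
    have hstep : pvBest sc (g :: r) (b, s) = pvBest sc r (if sc g > s then (g, sc g) else (b, s)) := by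
      simp only [pvBest, List.foldl_cons]
    rw [hstep]
    simp only [pvFam]
    cases hr : pvFam sc r with
    | none =>
      have hre : r = [] := by
        cases r with
        | nil => rfl
        | cons a b =>
          rcases pvFam_ne_none (sc := sc) (ms := a :: b) (by simp) with ⟨m, hm⟩
          rw [hm] at hr; cases hr
      subst hre
      by_cases hg : sc g > s <;> simp [pvBest, hg]
    | some m =>
      by_cases hg : sc g > s
      · rw [if_pos hg, ih, hr]
        by_cases hgm : sc g ≥ sc m
        · have h1 : ¬ sc m > sc g := by omega
          simp [hgm, h1, hg]
        · have h1 : sc m > sc g := by omega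
          have h2 : sc m > s := by omega
          simp [hgm, h1, h2]
      · rw [if_neg hg, ih, hr]
        by_cases hgm : sc g ≥ sc m
        · have h1 : ¬ sc m > s := by omega
          simp [hgm, h1, hg]
        · simp [hgm]

theorem pvMax_aux (sc : String → Int) (f : Option String → String → Option String)
    (hf : ∀ m x, f (some m) x = if sc m < sc x then some x else some m) :
    ∀ (ms : List String) (m0 : String),
    ms.foldl f (some m0)
    = some (match pvFam sc ms with
        | none => m0
        | some m => if sc m0 < sc m then m else m0) := by
  intro ms
  induction ms with
  | nil => intro m0; simp [pvFam]
  | cons g r ih =>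
    intro m0
    rw [List.foldl_cons, hf]
    by_cases hg : sc m0 < sc g
    · rw [if_pos hg, ih]
      simp only [pvFam]
      cases hr : pvFam sc r with
      | none => simp [hg]
      | some m =>
        by_cases hgm : sc g ≥ sc m
        · have h1 : ¬ sc g < sc m := by omega
          simp [h1, hgm, hg]
        · have h1 : sc g < sc m := by omega
          have h2 : sc m0 < sc m := by omega
          simp [h1, hgm, h2]
    · rw [if_neg hg, ih]
      simp only [pvFam]
      cases hr : pvFam sc r with
      | none => simp [hg]
      | some m =>
        by_cases hgm : sc g ≥ sc m
        · have h2 : ¬ sc m0 < sc m := by omega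
          simp [hgm, h2, hg]
        · have h1 : sc g < sc m := by omega
          by_cases hm0 : sc m0 < sc m <;> simp [hgm, hm0]

theorem pvMax_eq (sc : String → Int) (ms : List String) : PySem.List.max? ms sc = pvFam sc ms := by
  cases ms with
  | nil => rfl
  | cons g r =>
    simp only [PySem.List.max?, List.foldl_cons]
    refine Eq.trans (pvMax_aux sc _ ?_ r g) ?_
    · intro m x; by_cases h : sc m < sc x <;> simp [h]
    · simp only [pvFam]
      cases hr : pvFam sc r with
      | none => rfl
      | some m =>
        by_cases hgm : sc g ≥ sc m
        · have h1 : ¬ sc g < sc m := by omega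
          simp [h1, hgm]
        · have h1 : sc g < sc m := by omega
          simp [h1, hgm]

-- A's tophits loop, characterised key-wise: the entry at any type t is the strict-> scan
-- of the bucket of t, started from whatever the dict held at t.
theorem pv_foldA_get (gs0 : List (String × List (String × Int))) :
    ∀ (gs : List (String × List (String × Int))) (th : PySem.Dict String (String × Int)) (t : String),
    (((gs.foldl (fun tophits kv =>
        if PySem.Str.startswith kv.1 "wz" then
          if pvScoreOf gs0 kv.1 > ((tophits.get? (PySem.Str.slice kv.1 none (some 3))).getD ("", 0)).2 then
            tophits.insert (PySem.Str.slice kv.1 none (some 3)) (kv.1, pvScoreOf gs0 kv.1)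
          else tophits
        else tophits) th).get? t).getD ("", 0))
      = pvBest (pvScoreOf gs0) (pvBucket gs t) ((th.get? t).getD ("", 0)) := by
  intro gs
  induction gs with
  | nil => intro th t; simp [pvBucket, pvBest]
  | cons kv gs ih =>
    intro th t
    rw [List.foldl_cons]
    have hsl : PySem.Str.slice kv.1 none (some 3) = pvTy kv.1 := rfl
    by_cases hw : PySem.Str.startswith kv.1 "wz" = true
    · rw [if_pos hw]
      by_cases ht : pvTy kv.1 = t
      · rw [pvBucket_cons_of gs hw ht]
        have hbc : pvBest (pvScoreOf gs0) (kv.1 :: pvBucket gs t) ((th.get? t).getD ("", 0))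
            = pvBest (pvScoreOf gs0) (pvBucket gs t)
                (if pvScoreOf gs0 kv.1 > ((th.get? t).getD ("", 0)).2 then (kv.1, pvScoreOf gs0 kv.1)
                 else ((th.get? t).getD ("", 0))) := by
          simp only [pvBest, List.foldl_cons]
        rw [hbc, hsl, ht]
        by_cases hs : pvScoreOf gs0 kv.1 > ((th.get? t).getD ("", 0)).2
        · rw [if_pos hs, if_pos hs, ih]
          congr 1
          simp [PySem.Dict.get?_insert_self]
        · rw [if_neg hs, if_neg hs, ih]
      · rw [pvBucket_cons_not gs (Or.inr ht), hsl]
        by_cases hs : pvScoreOf gs0 kv.1 > ((th.get? (pvTy kv.1)).getD ("", 0)).2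
        · rw [if_pos hs, ih]
          congr 1
          rw [PySem.Dict.get?_insert_of_ne _ _ (Ne.symm ht)]
        · rw [if_neg hs, ih]
    · rw [if_neg hw, pvBucket_cons_not gs (Or.inl (by simpa using hw))]
      exact ih th t

-- B's bucketing loop on the four-type dict literal
theorem pv_foldB_items :
    ∀ (gs : List (String × List (String × Int))) (m1 m2 m3 m4 : List String),
    (∀ kv ∈ gs, PySem.Str.startswith kv.1 "wz" = true →
        pvTy kv.1 ∈ (["wzx", "wzy", "wzt", "wzm"] : List String)) →
    gs.foldl (fun buckets kv =>
        if PySem.Str.startswith kv.1 "wz" then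
          if buckets.contains (PySem.Str.slice kv.1 none (some 3)) then
            buckets.modify (PySem.Str.slice kv.1 none (some 3)) [] (fun l => l ++ [kv.1])
          else buckets
        else buckets) (pvMkB m1 m2 m3 m4)
      = pvMkB (m1 ++ pvBucket gs "wzx") (m2 ++ pvBucket gs "wzy")
              (m3 ++ pvBucket gs "wzt") (m4 ++ pvBucket gs "wzm") := by
  intro gs
  induction gs with
  | nil => intro m1 m2 m3 m4 h; simp [pvBucket]
  | cons kv gs ih =>
    intro m1 m2 m3 m4 h
    have hrest : ∀ kv' ∈ gs, PySem.Str.startswith kv'.1 "wz" = true →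
        pvTy kv'.1 ∈ (["wzx", "wzy", "wzt", "wzm"] : List String) := by
      intro kv' h1 h2; exact h kv' (by simp [h1]) h2
    rw [List.foldl_cons]
    by_cases hw : PySem.Str.startswith kv.1 "wz" = true
    · have hty := h kv (by simp) hw
      simp only [List.mem_cons, List.not_mem_nil, or_false] at hty
      rw [if_pos hw]
      rcases hty with h1 | h1 | h1 | h1
      · rw [show PySem.Str.slice kv.1 none (some 3) = "wzx" from h1]
        rw [if_pos (show ((pvMkB m1 m2 m3 m4).contains "wzx") = true from rfl)]
        rw [show (pvMkB m1 m2 m3 m4).modify "wzx" [] (fun l => l ++ [kv.1]) = pvMkB (m1 ++ [kv.1]) m2 m3 m4 from rfl]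
        rw [ih _ _ _ _ hrest, pvBucket_cons_of gs hw h1,
          pvBucket_cons_not gs (Or.inr (by rw [h1]; decide)),
          pvBucket_cons_not gs (Or.inr (by rw [h1]; decide)),
          pvBucket_cons_not gs (Or.inr (by rw [h1]; decide))]
        simp [pvMkB]
      · rw [show PySem.Str.slice kv.1 none (some 3) = "wzy" from h1]
        rw [if_pos (show ((pvMkB m1 m2 m3 m4).contains "wzy") = true from rfl)]
        rw [show (pvMkB m1 m2 m3 m4).modify "wzy" [] (fun l => l ++ [kv.1]) = pvMkB m1 (m2 ++ [kv.1]) m3 m4 from rfl]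
        rw [ih _ _ _ _ hrest, pvBucket_cons_of gs hw h1,
          pvBucket_cons_not gs (Or.inr (by rw [h1]; decide)),
          pvBucket_cons_not gs (Or.inr (by rw [h1]; decide)),
          pvBucket_cons_not gs (Or.inr (by rw [h1]; decide))]
        simp [pvMkB]
      · rw [show PySem.Str.slice kv.1 none (some 3) = "wzt" from h1]
        rw [if_pos (show ((pvMkB m1 m2 m3 m4).contains "wzt") = true from rfl)]
        rw [show (pvMkB m1 m2 m3 m4).modify "wzt" [] (fun l => l ++ [kv.1]) = pvMkB m1 m2 (m3 ++ [kv.1]) m4 from rfl]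
        rw [ih _ _ _ _ hrest, pvBucket_cons_of gs hw h1,
          pvBucket_cons_not gs (Or.inr (by rw [h1]; decide)),
          pvBucket_cons_not gs (Or.inr (by rw [h1]; decide)),
          pvBucket_cons_not gs (Or.inr (by rw [h1]; decide))]
        simp [pvMkB]
      · rw [show PySem.Str.slice kv.1 none (some 3) = "wzm" from h1]
        rw [if_pos (show ((pvMkB m1 m2 m3 m4).contains "wzm") = true from rfl)]
        rw [show (pvMkB m1 m2 m3 m4).modify "wzm" [] (fun l => l ++ [kv.1]) = pvMkB m1 m2 m3 (m4 ++ [kv.1]) from rfl]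
        rw [ih _ _ _ _ hrest, pvBucket_cons_of gs hw h1,
          pvBucket_cons_not gs (Or.inr (by rw [h1]; decide)),
          pvBucket_cons_not gs (Or.inr (by rw [h1]; decide)),
          pvBucket_cons_not gs (Or.inr (by rw [h1]; decide))]
        simp [pvMkB]
    · rw [if_neg hw, ih _ _ _ _ hrest,
        pvBucket_cons_not gs (Or.inl (by simpa using hw)),
        pvBucket_cons_not gs (Or.inl (by simpa using hw)),
        pvBucket_cons_not gs (Or.inl (by simpa using hw)),
        pvBucket_cons_not gs (Or.inl (by simpa using hw))]

theorem pv_contains_add (s : PySem.Set String) (x y : String) :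
    PySem.Set.contains (PySem.Set.add s x) y = (PySem.Set.contains s y || y == x) := by
  by_cases hc : PySem.Set.contains s x = true
  · rw [PySem.Set.add, if_pos hc]
    by_cases hyx : y = x
    · subst hyx
      rw [beq_self_eq_true, Bool.or_true]
      exact hc
    · have : (y == x) = false := by simpa using hyx
      rw [this, Bool.or_false]
  · rw [PySem.Set.add, if_neg hc]
    show List.contains (s ++ [x]) y = _
    rw [List.contains_append]
    by_cases h : y = x <;> simp [h]

theorem pv_keepfold (gs0 : List (String × List (String × Int))) :
    ∀ (mss : List (List String)) (kp : PySem.Set String) (k : String),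
    PySem.Set.contains (mss.foldl (fun keep members =>
        if members ≠ [] then
          match PySem.List.max? members (fun g => pvScoreOf gs0 g) with
          | some keeper => if pvScoreOf gs0 keeper > 0 then keep.add keeper else keep
          | none => keep
        else keep) kp) k
    = (PySem.Set.contains kp k || mss.any (fun ms => pvKeepC gs0 ms k)) := by
  intro mss
  induction mss with
  | nil => intro kp k; simp
  | cons ms mss ih =>
    intro kp k
    rw [List.foldl_cons, ih, List.any_cons]
    by_cases hne : ms ≠ []
    · rw [if_pos hne]
      cases hm : PySem.List.max? ms (fun g => pvScoreOf gs0 g) with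
      | none => simp [pvKeepC, hm]
      | some keeper =>
        have hred : (match some keeper with
            | some keeper => if pvScoreOf gs0 keeper > 0 then kp.add keeper else kp
            | none => kp) = if pvScoreOf gs0 keeper > 0 then kp.add keeper else kp := rfl
        rw [hred]
        have hredC : pvKeepC gs0 ms k = (k == keeper && decide (0 < pvScoreOf gs0 keeper)) := by
          unfold pvKeepC
          rw [hm]
        by_cases hs : pvScoreOf gs0 keeper > 0
        · rw [if_pos hs, pv_contains_add]
          have hd : decide (0 < pvScoreOf gs0 keeper) = true := by simpa using hs
          rw [hredC, hd, Bool.and_true, Bool.or_assoc]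
        · rw [if_neg hs]
          have hd : decide (0 < pvScoreOf gs0 keeper) = false := by simpa using hs
          rw [hredC, hd, Bool.and_false, Bool.false_or]
    · rw [if_neg hne]
      have : ms = [] := by simpa using hne
      subst this
      simp [pvKeepC, show (PySem.List.max? ([] : List String) (fun g => pvScoreOf gs0 g)) = (none : Option String) from rfl]

theorem pv_erasefold {ν : Type} :
    ∀ (rm : List String) (l : List (String × ν)),
    (rm.foldl (fun genes g => genes.erase g) (PySem.Dict.mk l)).items
      = l.filter (fun kv => !(rm.contains kv.1)) := by
  intro rm
  induction rm with
  | nil => intro l; simp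
  | cons r rm ih =>
    intro l
    rw [List.foldl_cons]
    rw [show (PySem.Dict.mk l).erase r = PySem.Dict.mk (l.filter (fun p => !(p.1 == r))) from rfl]
    rw [ih, List.filter_filter]
    apply List.filter_congr
    intro kv _
    rw [List.contains_cons]
    cases h1 : (kv.1 == r) <;> cases h2 : rm.contains kv.1 <;> simp [h1, h2]

theorem pv_mem_rm {ν : Type} (p : (String × ν) → Bool)
    (hdep : ∀ (a b : String × ν), a.1 = b.1 → p a = p b)
    (gs : List (String × ν)) (kv : String × ν) (hkv : kv ∈ gs) :
    ((gs.filter p).map (·.1)).contains kv.1 = p kv := by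
  cases hp : p kv with
  | true =>
    have hm : kv.1 ∈ (gs.filter p).map (·.1) :=
      List.mem_map.mpr ⟨kv, List.mem_filter.mpr ⟨hkv, hp⟩, rfl⟩
    exact List.contains_iff_mem.mpr hm
  | false =>
    have hnm : kv.1 ∉ (gs.filter p).map (·.1) := by
      intro hm
      rcases List.mem_map.mp hm with ⟨kv', hkv', he⟩
      rcases List.mem_filter.mp hkv' with ⟨_, hp'⟩
      rw [hdep kv' kv he] at hp'
      rw [hp] at hp'
      cases hp'
    rw [← Bool.not_eq_true]
    simp only [List.contains_iff_mem]
    exact hnm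

theorem pv_filter_form {ν : Type} (p : (String × ν) → Bool)
    (hdep : ∀ (a b : String × ν), a.1 = b.1 → p a = p b) (gs : List (String × ν)) :
    (((gs.filter p).map (·.1)).foldl (fun genes g => genes.erase g) (PySem.Dict.mk gs)).items
      = gs.filter (fun kv => !(p kv)) := by
  rw [pv_erasefold]
  apply List.filter_congr
  intro kv hkv
  rw [pv_mem_rm p hdep gs kv hkv]

theorem pv_removefold (th : PySem.Dict String (String × Int)) :
    ∀ (gs : List (String × List (String × Int))) (acc : List String),
    gs.foldl (fun remove kv =>
        if PySem.Str.startswith kv.1 "wz" then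
          if kv.1 ≠ ((th.get? (PySem.Str.slice kv.1 none (some 3))).getD ("", 0)).1 then
            remove ++ [kv.1]
          else remove
        else remove) acc
    = acc ++ (gs.filter (fun kv => PySem.Str.startswith kv.1 "wz" &&
        !(kv.1 == ((th.get? (PySem.Str.slice kv.1 none (some 3))).getD ("", 0)).1))).map (·.1) := by
  intro gs
  induction gs with
  | nil => intro acc; simp
  | cons kv gs ih =>
    intro acc
    rw [List.foldl_cons, List.filter_cons]
    by_cases hw : PySem.Str.startswith kv.1 "wz" = true
    · rw [if_pos hw]
      by_cases hne : kv.1 ≠ ((th.get? (PySem.Str.slice kv.1 none (some 3))).getD ("", 0)).1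
      · rw [if_pos hne, ih]
        have hb : (kv.1 == ((th.get? (PySem.Str.slice kv.1 none (some 3))).getD ("", 0)).1) = false := by
          simpa using hne
        rw [hw, hb]
        rw [if_pos (show (true && !false) = true from rfl)]
        simp [List.append_assoc]
      · rw [if_neg hne, ih]
        have hb : (kv.1 == ((th.get? (PySem.Str.slice kv.1 none (some 3))).getD ("", 0)).1) = true := by
          rw [beq_iff_eq]
          simpa using hne
        rw [hw, hb]
        rw [if_neg (show ¬ ((true && !true) = true) from by decide)]
    · have hwf : PySem.Str.startswith kv.1 "wz" = false := by simpa using hw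
      rw [if_neg hw, ih, hwf]
      rw [if_neg (show ¬ ((false && !(kv.1 == ((th.get? (PySem.Str.slice kv.1 none (some 3))).getD ("", 0)).1)) = true) from by simp)]

theorem pv_wz_ne_empty {k : String} (h : PySem.Str.startswith k "wz" = true) : (k == "") = false := by
  cases hk : (k == "") with
  | false => rfl
  | true =>
    have hk' : k = "" := by simpa using hk
    subst hk'
    exact absurd h (by decide)

theorem pv_ty_of_mem_bucket {gs : List (String × List (String × Int))} {t m : String}
    (h : m ∈ pvBucket gs t) : pvTy m = t := by
  simp only [pvBucket, List.mem_map, List.mem_filter] at h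
  rcases h with ⟨kv, ⟨_, hc⟩, he⟩
  rw [Bool.and_eq_true, beq_iff_eq] at hc
  rw [← he]
  exact hc.2

theorem pv_keepC_ne (gs0 gs : List (String × List (String × Int))) {t k : String}
    (h : pvTy k ≠ t) : pvKeepC gs0 (pvBucket gs t) k = false := by
  unfold pvKeepC
  cases hm : PySem.List.max? (pvBucket gs t) (fun g => pvScoreOf gs0 g) with
  | none => rfl
  | some m =>
    have hmem : m ∈ pvBucket gs t := PySem.List.max?_mem hm
    have hty : pvTy m = t := pv_ty_of_mem_bucket hmem
    have hne : (k == m) = false := by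
      refine beq_eq_false_iff_ne.mpr ?_
      intro he
      exact h (he ▸ hty)
    have hred : (match some m with
        | some m => k == m && decide (0 < pvScoreOf gs0 m)
        | none => false) = (k == m && decide (0 < pvScoreOf gs0 m)) := rfl
    rw [hred, hne, Bool.false_and]

theorem pv_core (gs0 : List (String × List (String × Int))) (ms : List String) (k : String)
    (hk : k ∈ ms) (hne : (k == "") = false) :
    (k == (pvBest (pvScoreOf gs0) ms ("", 0)).1) = pvKeepC gs0 ms k := by
  have hnil : ms ≠ [] := List.ne_nil_of_mem hk
  rcases pvFam_ne_none (sc := fun g => pvScoreOf gs0 g) hnil with ⟨m, hm⟩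
  unfold pvKeepC
  rw [pvMax_eq, hm, pvBest_eq, hm]
  have hred : (match some m with
      | some m => k == m && decide (0 < pvScoreOf gs0 m)
      | none => false) = (k == m && decide (0 < pvScoreOf gs0 m)) := rfl
  rw [hred]
  have hred2 : (match some m with
      | none => (("", 0) : String × Int)
      | some m => if pvScoreOf gs0 m > 0 then (m, pvScoreOf gs0 m) else ("", 0))
      = (if pvScoreOf gs0 m > 0 then (m, pvScoreOf gs0 m) else (("", 0) : String × Int)) := rfl
  rw [hred2]
  by_cases hs : pvScoreOf gs0 m > 0
  · rw [if_pos hs]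
    have hd : decide (0 < pvScoreOf gs0 m) = true := by simpa using hs
    rw [hd, Bool.and_true]
  · rw [if_neg hs]
    have hd : decide (0 < pvScoreOf gs0 m) = false := by simpa using hs
    rw [hd, Bool.and_false]
    rw [show (("", 0) : String × Int).1 = "" from rfl, hne]

-- ===== VERDICT (by name: the statement is the Claim_ definition above) =====
theorem top_ranked_oantigen_spec : Claim_equal_top_ranked_oantigen := by
  intro gs _hdom hpre
  show top_ranked_oantigen gs = top_ranked_oantigen_alt gs
  have hty : ∀ kv ∈ gs, PySem.Str.startswith kv.1 "wz" = true →
      pvTy kv.1 ∈ (["wzx", "wzy", "wzt", "wzm"] : List String) := by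
    intro kv h hw
    exact (hpre kv h hw).1
  simp only [top_ranked_oantigen, top_ranked_oantigen_alt, delete_genes]
  rw [pv_removefold]
  rw [List.nil_append]
  rw [pv_filter_form _ (fun a b h => by simp only [h]) gs]
  rw [pv_filter_form _ (fun a b h => by simp only [h]) gs]
  apply List.filter_congr
  intro kv hkv
  by_cases hw : PySem.Str.startswith kv.1 "wz" = true
  · -- B side: compute the keep set
    rw [show PySem.Dict.mk ([("wzx", []), ("wzy", []), ("wzt", []), ("wzm", [])] :
        List (String × List String)) = pvMkB [] [] [] [] from rfl]
    rw [pv_foldB_items gs [] [] [] [] hty]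
    simp only [List.nil_append]
    rw [show ∀ m1 m2 m3 m4, (pvMkB m1 m2 m3 m4).values = [m1, m2, m3, m4] from fun _ _ _ _ => rfl]
    rw [pv_keepfold gs]
    rw [show PySem.Set.contains PySem.Set.empty kv.1 = false from rfl]
    simp only [List.any_cons, List.any_nil, Bool.false_or, Bool.or_false]
    -- A side
    have hmemb : ∀ t, pvTy kv.1 = t → kv.1 ∈ pvBucket gs t := by
      intro t h1
      exact List.mem_map.mpr ⟨kv, List.mem_filter.mpr ⟨hkv, by
        rw [hw, Bool.true_and, h1, beq_self_eq_true]⟩, rfl⟩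
    have hne := pv_wz_ne_empty hw
    have ht4 := hty kv hkv hw
    simp only [List.mem_cons, List.not_mem_nil, or_false] at ht4
    rcases ht4 with h1 | h1 | h1 | h1
    · rw [show PySem.Str.slice kv.1 none (some 3) = "wzx" from h1]
      rw [pv_foldA_get gs gs _ "wzx"]
      rw [show ((((["wzx", "wzy", "wzt", "wzm"] : List String).foldl
          (fun d x => d.insert x (("", 0) : String × Int)) (PySem.Dict.mk [])).get? "wzx").getD ("", 0))
          = (("", 0) : String × Int) from rfl]
      rw [pv_keepC_ne gs gs (t := "wzy") (by rw [h1]; decide),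
        pv_keepC_ne gs gs (t := "wzt") (by rw [h1]; decide),
        pv_keepC_ne gs gs (t := "wzm") (by rw [h1]; decide)]
      simp only [Bool.or_false, Bool.false_or]
      rw [pv_core gs (pvBucket gs "wzx") kv.1 (hmemb _ h1) hne]
    · rw [show PySem.Str.slice kv.1 none (some 3) = "wzy" from h1]
      rw [pv_foldA_get gs gs _ "wzy"]
      rw [show ((((["wzx", "wzy", "wzt", "wzm"] : List String).foldl
          (fun d x => d.insert x (("", 0) : String × Int)) (PySem.Dict.mk [])).get? "wzy").getD ("", 0))
          = (("", 0) : String × Int) from rfl]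
      rw [pv_keepC_ne gs gs (t := "wzx") (by rw [h1]; decide),
        pv_keepC_ne gs gs (t := "wzt") (by rw [h1]; decide),
        pv_keepC_ne gs gs (t := "wzm") (by rw [h1]; decide)]
      simp only [Bool.or_false, Bool.false_or]
      rw [pv_core gs (pvBucket gs "wzy") kv.1 (hmemb _ h1) hne]
    · rw [show PySem.Str.slice kv.1 none (some 3) = "wzt" from h1]
      rw [pv_foldA_get gs gs _ "wzt"]
      rw [show ((((["wzx", "wzy", "wzt", "wzm"] : List String).foldl
          (fun d x => d.insert x (("", 0) : String × Int)) (PySem.Dict.mk [])).get? "wzt").getD ("", 0))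
          = (("", 0) : String × Int) from rfl]
      rw [pv_keepC_ne gs gs (t := "wzx") (by rw [h1]; decide),
        pv_keepC_ne gs gs (t := "wzy") (by rw [h1]; decide),
        pv_keepC_ne gs gs (t := "wzm") (by rw [h1]; decide)]
      simp only [Bool.or_false, Bool.false_or]
      rw [pv_core gs (pvBucket gs "wzt") kv.1 (hmemb _ h1) hne]
    · rw [show PySem.Str.slice kv.1 none (some 3) = "wzm" from h1]
      rw [pv_foldA_get gs gs _ "wzm"]
      rw [show ((((["wzx", "wzy", "wzt", "wzm"] : List String).foldl
          (fun d x => d.insert x (("", 0) : String × Int)) (PySem.Dict.mk [])).get? "wzm").getD ("", 0))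
          = (("", 0) : String × Int) from rfl]
      rw [pv_keepC_ne gs gs (t := "wzx") (by rw [h1]; decide),
        pv_keepC_ne gs gs (t := "wzy") (by rw [h1]; decide),
        pv_keepC_ne gs gs (t := "wzt") (by rw [h1]; decide)]
      simp only [Bool.or_false, Bool.false_or]
      rw [pv_core gs (pvBucket gs "wzm") kv.1 (hmemb _ h1) hne]
  · have hwf : PySem.Str.startswith kv.1 "wz" = false := by simpa using hw
    rw [hwf]
    rfl
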